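-- pv_equiv track=rewrite | github.com/maahi07m/SparseLib | operations/addition_subtraction_algorithm.py | subtraction_algorithm_csr
-- ===== SOURCE A (Python) =====
-- def subtraction_algorithm_csr(ar, ia, ja, br, ib, jb):
--     """
--     :param ar: list
--     :param ia: list
--     :param ja: list
--     :param br: list
--     :param ib: list
--     :param jb: list
--     ----------------------
--     :return: three vectors, the result of subtraction stored in csr format
--     """
--     cr, ic, jc = [], [0], []
--
--     a_previous_row_index = 0
--     b_previous_row_index = 0
--     c_nz_counter = 0
--     for row_index in range(1, len(ia)):  # len(ia) = len(ib)
--         a_row_number = ia[row_index] - ia[row_index - 1]  # get A's row number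
--         b_row_number = ib[row_index] - ib[row_index - 1]  # get B's row number
--
--         new_a_row_index = a_previous_row_index + a_row_number
--         new_b_row_index = b_previous_row_index + b_row_number
--
--         a_columns = ja[a_previous_row_index: new_a_row_index]
--         b_columns = jb[b_previous_row_index: new_b_row_index]
--         a_values = ar[a_previous_row_index: new_a_row_index]
--         b_values = br[b_previous_row_index: new_b_row_index]
--
--         a_value_index = 0
--         b_value_index = 0
--         common_col = sorted(set(a_columns).intersection(b_columns))
--         distinct_a = sorted(set(a_columns).difference(b_columns))
--         distinct_b = sorted(set(b_columns).difference(a_columns))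
--         all_columns = sorted(set(a_columns).union(b_columns))
--         for index in all_columns:
--             if index in distinct_a:
--                 cr.append(a_values[a_value_index])
--                 jc.append(index)
--                 a_value_index += 1
--                 c_nz_counter += 1
--             elif index in distinct_b:
--                 cr.append(-b_values[b_value_index])
--                 jc.append(index)
--                 b_value_index += 1
--                 c_nz_counter += 1
--             elif index in common_col:
--                 new_value = a_values[a_value_index] - b_values[b_value_index]
--                 if new_value == 0:
--                     a_value_index += 1
--                     b_value_index += 1
--                     continue
--                 else:
--                     cr.append(new_value)
--                     jc.append(index)
--                     a_value_index += 1
--                     b_value_index += 1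
--                     c_nz_counter += 1
--         ic.append(c_nz_counter)
--         a_previous_row_index = new_a_row_index
--         b_previous_row_index = new_b_row_index
--
--     return cr, ic, jc
-- ===== SOURCE B (Python) =====
-- def subtraction_algorithm_csr(ar, ia, ja, br, ib, jb):
--     """Subtract two CSR matrices row by row.
--
--     In this storage scheme a row's values apply to its distinct column indices
--     in increasing column order, so each row is reconstructed by pairing
--     sorted(set(columns)) with the row's values positionally; the two rows are
--     then combined by a single two-pointer merge.
--     """
--     cr, ic, jc = [], [0], []
--     a_start = b_start = 0
--     for r in range(1, len(ia)):
--         a_end = a_start + ia[r] - ia[r - 1]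
--         b_end = b_start + ib[r] - ib[r - 1]
--         a_cols, a_vals = sorted(set(ja[a_start:a_end])), ar[a_start:a_end]
--         b_cols, b_vals = sorted(set(jb[b_start:b_end])), br[b_start:b_end]
--         i = j = 0
--         while i < len(a_cols) and j < len(b_cols):
--             if a_cols[i] < b_cols[j]:
--                 jc.append(a_cols[i]); cr.append(a_vals[i]); i += 1
--             elif b_cols[j] < a_cols[i]:
--                 jc.append(b_cols[j]); cr.append(-b_vals[j]); j += 1
--             else:
--                 v = a_vals[i] - b_vals[j]
--                 if v != 0:
--                     jc.append(a_cols[i]); cr.append(v)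
--                 i += 1; j += 1
--         while i < len(a_cols):
--             jc.append(a_cols[i]); cr.append(a_vals[i]); i += 1
--         while j < len(b_cols):
--             jc.append(b_cols[j]); cr.append(-b_vals[j]); j += 1
--         ic.append(len(cr))
--         a_start, b_start = a_end, b_end
--     return cr, ic, jc
-- ===== Notes on version B (the rewrite author's own statement) =====
-- stated objective: faster
-- what changed: Each row pairs its sorted distinct columns with the row's stored values positionally and combines the two rows by a single index-based two-pointer merge, instead of building three sorted sets plus a sorted union and scanning those lists for membership at every column.
import Mathlib
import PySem

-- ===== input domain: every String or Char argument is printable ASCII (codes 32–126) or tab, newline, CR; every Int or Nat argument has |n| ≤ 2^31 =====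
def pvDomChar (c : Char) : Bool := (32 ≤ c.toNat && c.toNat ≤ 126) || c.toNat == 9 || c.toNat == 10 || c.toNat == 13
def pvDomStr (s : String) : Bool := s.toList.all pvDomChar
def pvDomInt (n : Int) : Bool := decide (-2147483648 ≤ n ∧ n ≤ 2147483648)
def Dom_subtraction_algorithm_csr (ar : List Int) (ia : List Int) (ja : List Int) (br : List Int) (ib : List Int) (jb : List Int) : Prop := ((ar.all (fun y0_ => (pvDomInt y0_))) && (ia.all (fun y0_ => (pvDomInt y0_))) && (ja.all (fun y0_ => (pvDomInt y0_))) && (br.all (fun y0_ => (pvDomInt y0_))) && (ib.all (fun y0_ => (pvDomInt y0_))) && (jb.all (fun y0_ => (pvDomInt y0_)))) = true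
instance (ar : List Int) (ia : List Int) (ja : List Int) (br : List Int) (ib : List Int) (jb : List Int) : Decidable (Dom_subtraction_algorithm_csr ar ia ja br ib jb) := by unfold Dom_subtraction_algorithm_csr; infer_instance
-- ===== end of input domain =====

-- B pairs each row's sorted distinct columns with the row's values positionally and merges
-- the two rows with one index-based two-pointer pass, replacing A's per-row set algebra
-- (three sorted sets plus a sorted union, scanned by membership at every column).

-- ===== PORT A =====

-- inner-loop body of A ('for index in all_columns'); state (cr, jc, a_value_index, b_value_index, c_nz_counter).
-- a_values[a_value_index] is pyGetD with default 0: Pre_ (well-formed CSR) keeps the index in range exactly where Python does not raise IndexError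
def stepA (va vb dA dB cc : List Int) (st : List Int × List Int × Int × Int × Int) (idx : Int) :
    List Int × List Int × Int × Int × Int :=
  let (cr, jc, ai, bi, cnz) := st
  if dA.contains idx then
    (cr ++ [PySem.List.pyGetD va ai 0], jc ++ [idx], ai + 1, bi, cnz + 1)
  else if dB.contains idx then
    (cr ++ [-(PySem.List.pyGetD vb bi 0)], jc ++ [idx], ai, bi + 1, cnz + 1)
  else if cc.contains idx then
    (if PySem.List.pyGetD va ai 0 - PySem.List.pyGetD vb bi 0 = 0 then
      (cr, jc, ai + 1, bi + 1, cnz)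
    else
      (cr ++ [PySem.List.pyGetD va ai 0 - PySem.List.pyGetD vb bi 0], jc ++ [idx], ai + 1, bi + 1, cnz + 1))
  else (cr, jc, ai, bi, cnz)

-- body of A's row loop; state (cr, ic, jc, a_previous_row_index, b_previous_row_index, c_nz_counter)
def rowStepA (ar ia ja br ib jb : List Int)
    (st : List Int × List Int × List Int × Int × Int × Int) (row : Int) :
    List Int × List Int × List Int × Int × Int × Int :=
  let (cr, ic, jc, apri, bpri, cnz) := st
  let aRow := PySem.List.pyGetD ia row 0 - PySem.List.pyGetD ia (row - 1) 0
  let bRow := PySem.List.pyGetD ib row 0 - PySem.List.pyGetD ib (row - 1) 0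
  let newA := apri + aRow
  let newB := bpri + bRow
  let aCols := PySem.List.slice ja (some apri) (some newA)
  let bCols := PySem.List.slice jb (some bpri) (some newB)
  let aVals := PySem.List.slice ar (some apri) (some newA)
  let bVals := PySem.List.slice br (some bpri) (some newB)
  let cc := PySem.List.sorted (PySem.Set.inter (PySem.Set.ofList aCols) bCols) (fun x => x) false
  let dA := PySem.List.sorted (PySem.Set.diff (PySem.Set.ofList aCols) bCols) (fun x => x) false
  let dB := PySem.List.sorted (PySem.Set.diff (PySem.Set.ofList bCols) aCols) (fun x => x) false
  let allC := PySem.List.sorted (PySem.Set.union (PySem.Set.ofList aCols) bCols) (fun x => x) false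
  let r := allC.foldl (stepA aVals bVals dA dB cc) (cr, jc, 0, 0, cnz)
  (r.1, ic ++ [r.2.2.2.2], r.2.1, newA, newB, r.2.2.2.2)

def subtraction_algorithm_csr (ar : List Int) (ia : List Int) (ja : List Int) (br : List Int) (ib : List Int) (jb : List Int) : List Int × List Int × List Int :=
  let st := (PySem.List.pyRange 1 ia.length 1).foldl (rowStepA ar ia ja br ib jb)
    (([] : List Int), ([0] : List Int), ([] : List Int), (0 : Int), (0 : Int), (0 : Int))
  (st.1, st.2.1, st.2.2.1)

-- ===== PORT B =====

-- Source B's merge loops of one row ('while i < len(ca) and j < len(cb)' plus the two drain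
-- loops), as recursion on the indices i, j; ca[i]/cb[j] are in range under the loop guard,
-- va[i]/vb[j] are getD with default 0 (Pre_ keeps them in range exactly where Python does
-- not raise IndexError)
def mergeIdx (ca va cb vb : List Int) (i j : Nat) : List Int × List Int :=
  if hi : i < ca.length then
    if _hj : j < cb.length then
      if ca.getD i 0 < cb.getD j 0 then
        let r := mergeIdx ca va cb vb (i + 1) j
        (va.getD i 0 :: r.1, ca.getD i 0 :: r.2)
      else if cb.getD j 0 < ca.getD i 0 then
        let r := mergeIdx ca va cb vb i (j + 1)
        (-(vb.getD j 0) :: r.1, cb.getD j 0 :: r.2)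
      else
        let v := va.getD i 0 - vb.getD j 0
        let r := mergeIdx ca va cb vb (i + 1) (j + 1)
        if v = 0 then r else (v :: r.1, ca.getD i 0 :: r.2)
    else
      let r := mergeIdx ca va cb vb (i + 1) j
      (va.getD i 0 :: r.1, ca.getD i 0 :: r.2)
  else if _hj : j < cb.length then
    let r := mergeIdx ca va cb vb i (j + 1)
    (-(vb.getD j 0) :: r.1, cb.getD j 0 :: r.2)
  else ([], [])
termination_by (ca.length - i) + (cb.length - j)
decreasing_by all_goals omega

-- body of B's row loop; state (cr, ic, jc, a_start, b_start)
def rowStepB (ar ia ja br ib jb : List Int)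
    (st : List Int × List Int × List Int × Int × Int) (r : Int) : List Int × List Int × List Int × Int × Int :=
  let (cr, ic, jc, aStart, bStart) := st
  let aEnd := aStart + PySem.List.pyGetD ia r 0 - PySem.List.pyGetD ia (r - 1) 0
  let bEnd := bStart + PySem.List.pyGetD ib r 0 - PySem.List.pyGetD ib (r - 1) 0
  let ca := PySem.List.sorted (PySem.Set.ofList (PySem.List.slice ja (some aStart) (some aEnd))) (fun x => x) false
  let va := PySem.List.slice ar (some aStart) (some aEnd)
  let cb := PySem.List.sorted (PySem.Set.ofList (PySem.List.slice jb (some bStart) (some bEnd))) (fun x => x) false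
  let vb := PySem.List.slice br (some bStart) (some bEnd)
  let m := mergeIdx ca va cb vb 0 0
  let cr' := cr ++ m.1
  (cr', ic ++ [(cr'.length : Int)], jc ++ m.2, aEnd, bEnd)

def subtraction_algorithm_csr_alt (ar : List Int) (ia : List Int) (ja : List Int) (br : List Int) (ib : List Int) (jb : List Int) : List Int × List Int × List Int :=
  let st := (PySem.List.pyRange 1 ia.length 1).foldl (rowStepB ar ia ja br ib jb)
    (([] : List Int), ([0] : List Int), ([] : List Int), (0 : Int), (0 : Int))
  (st.1, st.2.1, st.2.2.1)

-- ===== PRECONDITION & SPEC =====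

-- per row (at A's cumulative offsets ptr[k]-ptr[0]): no more distinct columns than values —
-- exactly the condition under which A's positional value lookups stay in range
def rowsOk (n : Nat) (ptr cols vals : List Int) : Prop :=
  ∀ k : Nat, k < n - 1 →
    (PySem.Set.ofList (PySem.List.slice cols (some (ptr.getD k 0 - ptr.getD 0 0)) (some (ptr.getD (k + 1) 0 - ptr.getD 0 0)))).length
      ≤ (PySem.List.slice vals (some (ptr.getD k 0 - ptr.getD 0 0)) (some (ptr.getD (k + 1) 0 - ptr.getD 0 0))).length

-- Pre_ is exactly the set of inputs on which the Python A returns normally: enough row pointers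
-- in ib and, per row, values for every distinct column; outside it A raises IndexError.
def Pre_subtraction_algorithm_csr (ar : List Int) (ia : List Int) (ja : List Int) (br : List Int) (ib : List Int) (jb : List Int) : Prop :=
  (ia.length ≤ 1 ∨ ia.length ≤ ib.length) ∧ rowsOk ia.length ia ja ar ∧ rowsOk ia.length ib jb br

instance (ar : List Int) (ia : List Int) (ja : List Int) (br : List Int) (ib : List Int) (jb : List Int) : Decidable (Pre_subtraction_algorithm_csr ar ia ja br ib jb) := by
  unfold Pre_subtraction_algorithm_csr rowsOk; infer_instance

def pvWitness_subtraction_algorithm_csr : List Int × List Int × List Int × List Int × List Int × List Int :=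
  ([5, 7], [0, 1, 2], [0, 1], [3, 4], [0, 1, 2], [1, 1])

def Spec_subtraction_algorithm_csr (ar : List Int) (ia : List Int) (ja : List Int) (br : List Int) (ib : List Int) (jb : List Int) (out : List Int × List Int × List Int) : Prop := out = subtraction_algorithm_csr_alt ar ia ja br ib jb
instance (ar : List Int) (ia : List Int) (ja : List Int) (br : List Int) (ib : List Int) (jb : List Int) (out : List Int × List Int × List Int) : Decidable (Spec_subtraction_algorithm_csr ar ia ja br ib jb out) := by unfold Spec_subtraction_algorithm_csr; infer_instance

-- ===== CLAIM (what is proved, stated in full; the proofs are below) =====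
def Claim_equal_subtraction_algorithm_csr : Prop := ∀ (ar : List Int) (ia : List Int) (ja : List Int) (br : List Int) (ib : List Int) (jb : List Int), Dom_subtraction_algorithm_csr ar ia ja br ib jb → Pre_subtraction_algorithm_csr ar ia ja br ib jb → Spec_subtraction_algorithm_csr ar ia ja br ib jb (subtraction_algorithm_csr ar ia ja br ib jb)

-- ===== LEMMAS AND PROOFS =====

def sUnion : List Int → List Int → List Int
  | [], cb => cb
  | ca, [] => ca
  | x :: ca, y :: cb =>
    if x < y then x :: sUnion ca (y :: cb)
    else if y < x then y :: sUnion (x :: ca) cb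
    else x :: sUnion ca cb
termination_by ca cb => ca.length + cb.length

-- proof-side view of B's merge: the same computation on the zipped suffixes
def mergeRow : List (Int × Int) → List (Int × Int) → List Int × List Int
  | [], pb => (pb.map (fun p => -p.2), pb.map (fun p => p.1))
  | pa, [] => (pa.map (fun p => p.2), pa.map (fun p => p.1))
  | (c1, v1) :: pa, (c2, v2) :: pb =>
    if c1 < c2 then
      let r := mergeRow pa ((c2, v2) :: pb); (v1 :: r.1, c1 :: r.2)
    else if c2 < c1 then
      let r := mergeRow ((c1, v1) :: pa) pb; (-v2 :: r.1, c2 :: r.2)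
    else
      let r := mergeRow pa pb
      if v1 - v2 = 0 then r else ((v1 - v2) :: r.1, c1 :: r.2)
termination_by pa pb => pa.length + pb.length

-- small facts

theorem drop_cons_succ {l : List Int} {i : Nat} {x : Int} {t : List Int} (h : l.drop i = x :: t) :
    l.drop (i + 1) = t := by
  rw [← List.tail_drop, h]; rfl

theorem getElem?_of_drop_cons {l : List Int} {i : Nat} {x : Int} {t : List Int}
    (h : l.drop i = x :: t) : l[i]? = some x := by
  rw [← List.head?_drop, h]; rfl

theorem lt_length_of_drop_cons {l : List Int} {i : Nat} {x : Int} {t : List Int}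
    (h : l.drop i = x :: t) : i < l.length := by
  have := congrArg List.length h
  simp at this
  omega

theorem sUnion_nil_left (cb : List Int) : sUnion [] cb = cb := by simp [sUnion]
theorem sUnion_nil_right (ca : List Int) : sUnion ca [] = ca := by cases ca <;> simp [sUnion]
theorem mergeRow_nil_left (pb : List (Int × Int)) :
    mergeRow [] pb = (pb.map (fun p => -p.2), pb.map (fun p => p.1)) := by simp [mergeRow]
theorem mergeRow_nil_right (pa : List (Int × Int)) :
    mergeRow pa [] = (pa.map (fun p => p.2), pa.map (fun p => p.1)) := by cases pa <;> simp [mergeRow]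

-- the port of Source B's index loops equals the merge of the zipped suffixes
theorem mergeIdx_eq (ca va cb vb : List Int)
    (hla : ca.length ≤ va.length) (hlb : cb.length ≤ vb.length) :
    ∀ (i j : Nat),
    mergeIdx ca va cb vb i j
      = mergeRow ((ca.drop i).zip (va.drop i)) ((cb.drop j).zip (vb.drop j)) := by
  suffices main : ∀ (m i j : Nat), (ca.length - i) + (cb.length - j) ≤ m →
      mergeIdx ca va cb vb i j
        = mergeRow ((ca.drop i).zip (va.drop i)) ((cb.drop j).zip (vb.drop j)) by
    intro i j
    exact main _ i j le_rfl
  intro m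
  induction m with
  | zero =>
    intro i j hm
    have hi : ¬ i < ca.length := by omega
    have hj : ¬ j < cb.length := by omega
    have h1 : ca.drop i = [] := List.drop_eq_nil_iff.mpr (by omega)
    have h2 : cb.drop j = [] := List.drop_eq_nil_iff.mpr (by omega)
    rw [mergeIdx]
    simp [hi, hj, h1, h2, mergeRow]
  | succ m ih =>
    intro i j hm
    by_cases hi : i < ca.length
    · have hiv : i < va.length := by omega
      have hca : ca.drop i = ca[i] :: ca.drop (i + 1) := List.drop_eq_getElem_cons hi
      have hva : va.drop i = va[i] :: va.drop (i + 1) := List.drop_eq_getElem_cons hiv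
      have hgca : ca.getD i 0 = ca[i] := List.getD_eq_getElem ca 0 hi
      have hgva : va.getD i 0 = va[i] := List.getD_eq_getElem va 0 hiv
      by_cases hj : j < cb.length
      · have hjv : j < vb.length := by omega
        have hcb : cb.drop j = cb[j] :: cb.drop (j + 1) := List.drop_eq_getElem_cons hj
        have hvb : vb.drop j = vb[j] :: vb.drop (j + 1) := List.drop_eq_getElem_cons hjv
        have hgcb : cb.getD j 0 = cb[j] := List.getD_eq_getElem cb 0 hj
        have hgvb : vb.getD j 0 = vb[j] := List.getD_eq_getElem vb 0 hjv
        rw [mergeIdx]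
        simp only [dif_pos hi, dif_pos hj, hgca, hgva, hgcb, hgvb]
        rw [hca, hva, hcb, hvb, List.zip_cons_cons, List.zip_cons_cons]
        rcases lt_trichotomy ca[i] cb[j] with h | h | h
        · rw [if_pos h]
          have := ih (i + 1) j (by omega)
          rw [hcb, hvb, List.zip_cons_cons] at this
          simp only [mergeRow, if_pos h, this]
        · rw [if_neg (by omega), if_neg (by omega)]
          have := ih (i + 1) (j + 1) (by omega)
          simp only [mergeRow, if_neg (by omega : ¬ ca[i] < cb[j]), if_neg (by omega : ¬ cb[j] < ca[i]), this]
        · rw [if_neg (by omega), if_pos h]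
          have := ih i (j + 1) (by omega)
          rw [hca, hva, List.zip_cons_cons] at this
          simp only [mergeRow, if_neg (by omega : ¬ ca[i] < cb[j]), if_pos h, this]
      · have h2 : cb.drop j = [] := List.drop_eq_nil_iff.mpr (by omega)
        rw [mergeIdx]
        simp only [dif_pos hi, dif_neg hj, hgca, hgva]
        rw [ih (i + 1) j (by omega), h2]
        rw [hca, hva, List.zip_cons_cons]
        simp [mergeRow_nil_right]
    · have h1 : ca.drop i = [] := List.drop_eq_nil_iff.mpr (by omega)
      by_cases hj : j < cb.length
      · have hjv : j < vb.length := by omega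
        have hcb : cb.drop j = cb[j] :: cb.drop (j + 1) := List.drop_eq_getElem_cons hj
        have hvb : vb.drop j = vb[j] :: vb.drop (j + 1) := List.drop_eq_getElem_cons hjv
        have hgcb : cb.getD j 0 = cb[j] := List.getD_eq_getElem cb 0 hj
        have hgvb : vb.getD j 0 = vb[j] := List.getD_eq_getElem vb 0 hjv
        rw [mergeIdx]
        simp only [dif_neg hi, dif_pos hj, hgcb, hgvb]
        rw [ih i (j + 1) (by omega), h1]
        rw [hcb, hvb, List.zip_cons_cons]
        simp [mergeRow_nil_left]
      · have h2 : cb.drop j = [] := List.drop_eq_nil_iff.mpr (by omega)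
        rw [mergeIdx]
        simp [hi, hj, h1, h2, mergeRow]

theorem innerA (VA VB dA dB cc CA CB : List Int)
    (hCA : CA.Pairwise (· < ·)) (hCB : CB.Pairwise (· < ·))
    (hla : CA.length ≤ VA.length) (hlb : CB.length ≤ VB.length)
    (hdA : ∀ x : Int, x ∈ dA ↔ x ∈ CA ∧ x ∉ CB)
    (hdB : ∀ x : Int, x ∈ dB ↔ x ∈ CB ∧ x ∉ CA)
    (hcc : ∀ x : Int, x ∈ cc ↔ x ∈ CA ∧ x ∈ CB) :
    ∀ (i j : Nat), i ≤ CA.length → j ≤ CB.length →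
    (∀ u ∈ CA.take i ++ CB.take j, ∀ v ∈ CA.drop i ++ CB.drop j, u < v) →
    ∀ (cr jc : List Int) (cnz : Int),
    (sUnion (CA.drop i) (CB.drop j)).foldl (stepA VA VB dA dB cc) (cr, jc, (i : Int), (j : Int), cnz)
    = (cr ++ (mergeRow ((CA.drop i).zip (VA.drop i)) ((CB.drop j).zip (VB.drop j))).1,
       jc ++ (mergeRow ((CA.drop i).zip (VA.drop i)) ((CB.drop j).zip (VB.drop j))).2,
       (CA.length : Int), (CB.length : Int),
       cnz + ((mergeRow ((CA.drop i).zip (VA.drop i)) ((CB.drop j).zip (VB.drop j))).1.length : Int)) := by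
  suffices main : ∀ (m i j : Nat), (CA.length - i) + (CB.length - j) ≤ m → i ≤ CA.length → j ≤ CB.length →
      (∀ u ∈ CA.take i ++ CB.take j, ∀ v ∈ CA.drop i ++ CB.drop j, u < v) →
      ∀ (cr jc : List Int) (cnz : Int),
      (sUnion (CA.drop i) (CB.drop j)).foldl (stepA VA VB dA dB cc) (cr, jc, (i : Int), (j : Int), cnz)
      = (cr ++ (mergeRow ((CA.drop i).zip (VA.drop i)) ((CB.drop j).zip (VB.drop j))).1,
         jc ++ (mergeRow ((CA.drop i).zip (VA.drop i)) ((CB.drop j).zip (VB.drop j))).2,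
         (CA.length : Int), (CB.length : Int),
         cnz + ((mergeRow ((CA.drop i).zip (VA.drop i)) ((CB.drop j).zip (VB.drop j))).1.length : Int)) by
    intro i j hi hj hinv
    exact main _ i j le_rfl hi hj hinv
  intro m
  induction m with
  | zero =>
    intro i j hm hi hj _ cr jc cnz
    have h1 : CA.drop i = [] := List.drop_eq_nil_iff.mpr (by omega)
    have h2 : CB.drop j = [] := List.drop_eq_nil_iff.mpr (by omega)
    have hi' : (i : Int) = (CA.length : Int) := by omega
    have hj' : (j : Int) = (CB.length : Int) := by omega
    simp [h1, h2, sUnion, mergeRow, hi', hj']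
  | succ m ih =>
    intro i j hm hi hj hinv cr jc cnz
    have pA : (CA.drop i).Pairwise (· < ·) := hCA.sublist (List.drop_sublist ..)
    have pB : (CB.drop j).Pairwise (· < ·) := hCB.sublist (List.drop_sublist ..)
    rcases hA : CA.drop i with _ | ⟨x, ca'⟩
    · rcases hB : CB.drop j with _ | ⟨y, cb'⟩
      · have hi' : (i : Int) = (CA.length : Int) := by
          have := congrArg List.length hA; simp at this; omega
        have hj' : (j : Int) = (CB.length : Int) := by
          have := congrArg List.length hB; simp at this; omega
        simp [sUnion, mergeRow, hi', hj']
      · -- A exhausted, B has y :: cb'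
        have hilen : CA.length ≤ i := by
          have := congrArg List.length hA; simp at this; omega
        have hjlen : j < CB.length := lt_length_of_drop_cons hB
        have hyCB : y ∈ CB := List.mem_of_mem_drop (by rw [hB]; exact List.mem_cons_self)
        have hyA : y ∉ CA := by
          intro hmem
          have hCAeq : CA = CA.take i := by
            conv_lhs => rw [← List.take_append_drop i CA]
            rw [hA, List.append_nil]
          exact lt_irrefl _ (hinv y (List.mem_append.mpr (Or.inl (hCAeq ▸ hmem)))
            y (List.mem_append.mpr (Or.inr (by rw [hB]; exact List.mem_cons_self))))
        have hyDA : y ∉ dA := fun hmem => hyA ((hdA y).mp hmem).1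
        have hyDB : y ∈ dB := (hdB y).mpr ⟨hyCB, hyA⟩
        have hVBj : PySem.List.pyGetD VB (j : Int) 0 = VB[j]'(by omega) := by
          rw [PySem.List.pyGetD_natCast, List.getD_eq_getElem]
        have hVBdrop : VB.drop j = VB[j]'(by omega) :: VB.drop (j + 1) := List.drop_eq_getElem_cons (by omega)
        have hstep : stepA VA VB dA dB cc (cr, jc, (i : Int), (j : Int), cnz) y
            = (cr ++ [-(VB[j]'(by omega))], jc ++ [y], (i : Int), (j : Int) + 1, cnz + 1) := by
          simp [stepA, hyDA, hyDB, hVBj]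
        have hinv' : ∀ u ∈ CA.take i ++ CB.take (j + 1), ∀ v ∈ CA.drop i ++ CB.drop (j + 1), u < v := by
          intro u hu v hv
          rw [List.mem_append] at hu hv
          have hv' : v ∈ cb' := by
            rcases hv with hv | hv
            · rw [hA] at hv; simp at hv
            · rwa [drop_cons_succ hB] at hv
          have hvB : v ∈ CB.drop j := by rw [hB]; exact List.mem_cons_of_mem _ hv'
          rcases hu with hu | hu
          · exact hinv u (List.mem_append.mpr (Or.inl hu)) v (List.mem_append.mpr (Or.inr hvB))
          · rw [List.take_succ, getElem?_of_drop_cons hB] at hu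
            simp at hu
            rcases hu with hu | rfl
            · exact hinv u (List.mem_append.mpr (Or.inr hu)) v (List.mem_append.mpr (Or.inr hvB))
            · rw [hB] at pB
              exact (List.pairwise_cons.mp pB).1 v hv'
        have hrec := ih i (j + 1) (by omega) hi (by omega) hinv'
          (cr ++ [-(VB[j]'(by omega))]) (jc ++ [y]) (cnz + 1)
        rw [hA, drop_cons_succ hB, sUnion_nil_left] at hrec
        rw [sUnion_nil_left, List.foldl_cons, hstep]
        push_cast at hrec ⊢
        rw [hrec]
        rw [show (([] : List Int).zip (VA.drop i)) = ([] : List (Int × Int)) from rfl] at hrec ⊢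
        have e2 : (y :: cb').zip (VB.drop j) = (y, VB[j]'(by omega)) :: cb'.zip (VB.drop (j + 1)) := by
          rw [hVBdrop, List.zip_cons_cons]
        have hmr : mergeRow ([] : List (Int × Int)) ((y :: cb').zip (VB.drop j))
            = (-(VB[j]'(by omega)) :: (mergeRow ([] : List (Int × Int)) (cb'.zip (VB.drop (j + 1)))).1,
               y :: (mergeRow ([] : List (Int × Int)) (cb'.zip (VB.drop (j + 1)))).2) := by
          rw [e2, mergeRow_nil_left, mergeRow_nil_left]
          simp only [List.map_cons]
        rw [hmr]
        simp [List.append_assoc]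
        omega
    · rcases hB : CB.drop j with _ | ⟨y, cb'⟩
      · -- B exhausted, A has x :: ca'
        have hilen : i < CA.length := lt_length_of_drop_cons hA
        have hxCA : x ∈ CA := List.mem_of_mem_drop (by rw [hA]; exact List.mem_cons_self)
        have hxB : x ∉ CB := by
          intro hmem
          have hCBeq : CB = CB.take j := by
            conv_lhs => rw [← List.take_append_drop j CB]
            rw [hB, List.append_nil]
          exact lt_irrefl _ (hinv x (List.mem_append.mpr (Or.inr (hCBeq ▸ hmem)))
            x (List.mem_append.mpr (Or.inl (by rw [hA]; exact List.mem_cons_self))))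
        have hxDA : x ∈ dA := (hdA x).mpr ⟨hxCA, hxB⟩
        have hVAi : PySem.List.pyGetD VA (i : Int) 0 = VA[i]'(by omega) := by
          rw [PySem.List.pyGetD_natCast, List.getD_eq_getElem]
        have hVAdrop : VA.drop i = VA[i]'(by omega) :: VA.drop (i + 1) := List.drop_eq_getElem_cons (by omega)
        have hstep : stepA VA VB dA dB cc (cr, jc, (i : Int), (j : Int), cnz) x
            = (cr ++ [VA[i]'(by omega)], jc ++ [x], (i : Int) + 1, (j : Int), cnz + 1) := by
          simp [stepA, hxDA, hVAi]
        have hinv' : ∀ u ∈ CA.take (i + 1) ++ CB.take j, ∀ v ∈ CA.drop (i + 1) ++ CB.drop j, u < v := by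
          intro u hu v hv
          rw [List.mem_append] at hu hv
          have hv' : v ∈ ca' := by
            rcases hv with hv | hv
            · rwa [drop_cons_succ hA] at hv
            · rw [hB] at hv; simp at hv
          have hvA : v ∈ CA.drop i := by rw [hA]; exact List.mem_cons_of_mem _ hv'
          rcases hu with hu | hu
          · rw [List.take_succ, getElem?_of_drop_cons hA] at hu
            simp at hu
            rcases hu with hu | rfl
            · exact hinv u (List.mem_append.mpr (Or.inl hu)) v (List.mem_append.mpr (Or.inl hvA))
            · rw [hA] at pA
              exact (List.pairwise_cons.mp pA).1 v hv'
          · exact hinv u (List.mem_append.mpr (Or.inr hu)) v (List.mem_append.mpr (Or.inl hvA))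
        have hrec := ih (i + 1) j (by omega) (by omega) hj hinv'
          (cr ++ [VA[i]'(by omega)]) (jc ++ [x]) (cnz + 1)
        rw [drop_cons_succ hA, hB, sUnion_nil_right] at hrec
        rw [sUnion_nil_right, List.foldl_cons, hstep]
        push_cast at hrec ⊢
        rw [hrec]
        rw [show (([] : List Int).zip (VB.drop j)) = ([] : List (Int × Int)) from rfl] at hrec ⊢
        have e1 : (x :: ca').zip (VA.drop i) = (x, VA[i]'(by omega)) :: ca'.zip (VA.drop (i + 1)) := by
          rw [hVAdrop, List.zip_cons_cons]
        have hmr : mergeRow ((x :: ca').zip (VA.drop i)) (([] : List (Int × Int)))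
            = (VA[i]'(by omega) :: (mergeRow (ca'.zip (VA.drop (i + 1))) ([] : List (Int × Int))).1,
               x :: (mergeRow (ca'.zip (VA.drop (i + 1))) ([] : List (Int × Int))).2) := by
          rw [e1, mergeRow_nil_right, mergeRow_nil_right]
          simp only [List.map_cons]
        rw [hmr]
        simp [List.append_assoc]
        omega
      · -- both nonempty
        have hilen : i < CA.length := lt_length_of_drop_cons hA
        have hjlen : j < CB.length := lt_length_of_drop_cons hB
        have hxCA : x ∈ CA := List.mem_of_mem_drop (by rw [hA]; exact List.mem_cons_self)
        have hyCB : y ∈ CB := List.mem_of_mem_drop (by rw [hB]; exact List.mem_cons_self)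
        have hVAi : PySem.List.pyGetD VA (i : Int) 0 = VA[i]'(by omega) := by
          rw [PySem.List.pyGetD_natCast, List.getD_eq_getElem]
        have hVBj : PySem.List.pyGetD VB (j : Int) 0 = VB[j]'(by omega) := by
          rw [PySem.List.pyGetD_natCast, List.getD_eq_getElem]
        have hVAdrop : VA.drop i = VA[i]'(by omega) :: VA.drop (i + 1) := List.drop_eq_getElem_cons (by omega)
        have hVBdrop : VB.drop j = VB[j]'(by omega) :: VB.drop (j + 1) := List.drop_eq_getElem_cons (by omega)
        have pA' := pA; rw [hA] at pA'
        have pB' := pB; rw [hB] at pB'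
        rcases lt_trichotomy x y with hxy | hxy | hxy
        · -- x < y : column only in A
          have hxB : x ∉ CB := by
            intro hmem
            conv at hmem => rw [← List.take_append_drop j CB]
            rw [List.mem_append, hB] at hmem
            rcases hmem with hmem | hmem
            · exact lt_irrefl _ (hinv x (List.mem_append.mpr (Or.inr hmem))
                x (List.mem_append.mpr (Or.inl (by rw [hA]; exact List.mem_cons_self))))
            · rcases List.mem_cons.mp hmem with rfl | hmem
              · exact lt_irrefl _ hxy
              · exact lt_irrefl _ (lt_trans hxy ((List.pairwise_cons.mp pB').1 x hmem))
          have hxDA : x ∈ dA := (hdA x).mpr ⟨hxCA, hxB⟩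
          have hstep : stepA VA VB dA dB cc (cr, jc, (i : Int), (j : Int), cnz) x
              = (cr ++ [VA[i]'(by omega)], jc ++ [x], (i : Int) + 1, (j : Int), cnz + 1) := by
            simp [stepA, hxDA, hVAi]
          have hinv' : ∀ u ∈ CA.take (i + 1) ++ CB.take j, ∀ v ∈ CA.drop (i + 1) ++ CB.drop j, u < v := by
            intro u hu v hv
            rw [List.mem_append] at hu hv
            have hvA : v ∈ CA.drop i ++ CB.drop j := by
              rcases hv with hv | hv
              · rw [drop_cons_succ hA] at hv
                exact List.mem_append.mpr (Or.inl (by rw [hA]; exact List.mem_cons_of_mem _ hv))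
              · exact List.mem_append.mpr (Or.inr hv)
            rcases hu with hu | hu
            · rw [List.take_succ, getElem?_of_drop_cons hA] at hu
              simp at hu
              rcases hu with hu | rfl
              · exact hinv u (List.mem_append.mpr (Or.inl hu)) v hvA
              · rcases hv with hv | hv
                · rw [drop_cons_succ hA] at hv
                  exact (List.pairwise_cons.mp pA').1 _ hv
                · rw [hB] at hv
                  rcases List.mem_cons.mp hv with rfl | hv
                  · exact hxy
                  · exact lt_trans hxy ((List.pairwise_cons.mp pB').1 _ hv)
            · exact hinv u (List.mem_append.mpr (Or.inr hu)) v hvA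
          have hrec := ih (i + 1) j (by omega) (by omega) hj hinv'
            (cr ++ [VA[i]'(by omega)]) (jc ++ [x]) (cnz + 1)
          rw [drop_cons_succ hA, hB] at hrec
          have hsu : sUnion (x :: ca') (y :: cb') = x :: sUnion ca' (y :: cb') := by
            simp [sUnion, hxy]
          rw [hsu, List.foldl_cons, hstep]
          push_cast at hrec ⊢
          rw [hrec]
          have e1 : (x :: ca').zip (VA.drop i) = (x, VA[i]'(by omega)) :: ca'.zip (VA.drop (i + 1)) := by
            rw [hVAdrop, List.zip_cons_cons]
          have e2 : (y :: cb').zip (VB.drop j) = (y, VB[j]'(by omega)) :: cb'.zip (VB.drop (j + 1)) := by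
            rw [hVBdrop, List.zip_cons_cons]
          have hmr : mergeRow ((x :: ca').zip (VA.drop i)) ((y :: cb').zip (VB.drop j))
              = (VA[i]'(by omega) :: (mergeRow (ca'.zip (VA.drop (i + 1))) ((y :: cb').zip (VB.drop j))).1,
                 x :: (mergeRow (ca'.zip (VA.drop (i + 1))) ((y :: cb').zip (VB.drop j))).2) := by
            rw [e1, e2]
            simp [mergeRow, hxy]
          rw [hmr]
          simp [List.append_assoc]
          omega
        · -- x = y : common column
          subst hxy
          have hxDA : x ∉ dA := fun hmem => ((hdA x).mp hmem).2 hyCB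
          have hxDB : x ∉ dB := fun hmem => ((hdB x).mp hmem).2 hxCA
          have hxCC : x ∈ cc := (hcc x).mpr ⟨hxCA, hyCB⟩
          have hinv' : ∀ u ∈ CA.take (i + 1) ++ CB.take (j + 1), ∀ v ∈ CA.drop (i + 1) ++ CB.drop (j + 1), u < v := by
            intro u hu v hv
            rw [List.mem_append] at hu hv
            have hv' : v ∈ ca' ∨ v ∈ cb' := by
              rcases hv with hv | hv
              · left; rwa [drop_cons_succ hA] at hv
              · right; rwa [drop_cons_succ hB] at hv
            have hvA : v ∈ CA.drop i ++ CB.drop j := by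
              rcases hv' with hv' | hv'
              · exact List.mem_append.mpr (Or.inl (by rw [hA]; exact List.mem_cons_of_mem _ hv'))
              · exact List.mem_append.mpr (Or.inr (by rw [hB]; exact List.mem_cons_of_mem _ hv'))
            have hxlt : x < v := by
              rcases hv' with hv' | hv'
              · exact (List.pairwise_cons.mp pA').1 v hv'
              · exact (List.pairwise_cons.mp pB').1 v hv'
            rcases hu with hu | hu
            · rw [List.take_succ, getElem?_of_drop_cons hA] at hu
              simp at hu
              rcases hu with hu | rfl
              · exact hinv u (List.mem_append.mpr (Or.inl hu)) v hvA
              · exact hxlt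
            · rw [List.take_succ, getElem?_of_drop_cons hB] at hu
              simp at hu
              rcases hu with hu | rfl
              · exact hinv u (List.mem_append.mpr (Or.inr hu)) v hvA
              · exact hxlt
          have hsu : sUnion (x :: ca') (x :: cb') = x :: sUnion ca' cb' := by
            simp [sUnion]
          by_cases hv0 : VA[i]'(by omega) - VB[j]'(by omega) = 0
          · have hstep : stepA VA VB dA dB cc (cr, jc, (i : Int), (j : Int), cnz) x
                = (cr, jc, (i : Int) + 1, (j : Int) + 1, cnz) := by
              simp [stepA, hxDA, hxDB, hxCC, hVAi, hVBj, hv0]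
            have hrec := ih (i + 1) (j + 1) (by omega) (by omega) (by omega) hinv' cr jc cnz
            rw [drop_cons_succ hA, drop_cons_succ hB] at hrec
            rw [hsu, List.foldl_cons, hstep]
            push_cast at hrec ⊢
            rw [hrec]
            have e1 : (x :: ca').zip (VA.drop i) = (x, VA[i]'(by omega)) :: ca'.zip (VA.drop (i + 1)) := by
              rw [hVAdrop, List.zip_cons_cons]
            have e2 : (x :: cb').zip (VB.drop j) = (x, VB[j]'(by omega)) :: cb'.zip (VB.drop (j + 1)) := by
              rw [hVBdrop, List.zip_cons_cons]
            have hmr : mergeRow ((x :: ca').zip (VA.drop i)) ((x :: cb').zip (VB.drop j))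
                = mergeRow (ca'.zip (VA.drop (i + 1))) (cb'.zip (VB.drop (j + 1))) := by
              rw [e1, e2]
              simp [mergeRow, hv0]
            rw [hmr]
          · have hstep : stepA VA VB dA dB cc (cr, jc, (i : Int), (j : Int), cnz) x
                = (cr ++ [VA[i]'(by omega) - VB[j]'(by omega)], jc ++ [x], (i : Int) + 1, (j : Int) + 1, cnz + 1) := by
              simp [stepA, hxDA, hxDB, hxCC, hVAi, hVBj, hv0]
            have hrec := ih (i + 1) (j + 1) (by omega) (by omega) (by omega) hinv'
              (cr ++ [VA[i]'(by omega) - VB[j]'(by omega)]) (jc ++ [x]) (cnz + 1)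
            rw [drop_cons_succ hA, drop_cons_succ hB] at hrec
            rw [hsu, List.foldl_cons, hstep]
            push_cast at hrec ⊢
            rw [hrec]
            have e1 : (x :: ca').zip (VA.drop i) = (x, VA[i]'(by omega)) :: ca'.zip (VA.drop (i + 1)) := by
              rw [hVAdrop, List.zip_cons_cons]
            have e2 : (x :: cb').zip (VB.drop j) = (x, VB[j]'(by omega)) :: cb'.zip (VB.drop (j + 1)) := by
              rw [hVBdrop, List.zip_cons_cons]
            have hmr : mergeRow ((x :: ca').zip (VA.drop i)) ((x :: cb').zip (VB.drop j))
                = ((VA[i]'(by omega) - VB[j]'(by omega)) :: (mergeRow (ca'.zip (VA.drop (i + 1))) (cb'.zip (VB.drop (j + 1)))).1,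
                   x :: (mergeRow (ca'.zip (VA.drop (i + 1))) (cb'.zip (VB.drop (j + 1)))).2) := by
              rw [e1, e2]
              simp [mergeRow, hv0]
            rw [hmr]
            simp [List.append_assoc]
            omega
        · -- y < x : column only in B
          have hyA : y ∉ CA := by
            intro hmem
            conv at hmem => rw [← List.take_append_drop i CA]
            rw [List.mem_append, hA] at hmem
            rcases hmem with hmem | hmem
            · exact lt_irrefl _ (hinv y (List.mem_append.mpr (Or.inl hmem))
                y (List.mem_append.mpr (Or.inr (by rw [hB]; exact List.mem_cons_self))))
            · rcases List.mem_cons.mp hmem with rfl | hmem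
              · exact lt_irrefl _ hxy
              · exact lt_irrefl _ (lt_trans hxy ((List.pairwise_cons.mp pA').1 y hmem))
          have hyDA : y ∉ dA := fun hmem => hyA ((hdA y).mp hmem).1
          have hyDB : y ∈ dB := (hdB y).mpr ⟨hyCB, hyA⟩
          have hstep : stepA VA VB dA dB cc (cr, jc, (i : Int), (j : Int), cnz) y
              = (cr ++ [-(VB[j]'(by omega))], jc ++ [y], (i : Int), (j : Int) + 1, cnz + 1) := by
            simp [stepA, hyDA, hyDB, hVBj]
          have hinv' : ∀ u ∈ CA.take i ++ CB.take (j + 1), ∀ v ∈ CA.drop i ++ CB.drop (j + 1), u < v := by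
            intro u hu v hv
            rw [List.mem_append] at hu hv
            have hvA : v ∈ CA.drop i ++ CB.drop j := by
              rcases hv with hv | hv
              · exact List.mem_append.mpr (Or.inl hv)
              · rw [drop_cons_succ hB] at hv
                exact List.mem_append.mpr (Or.inr (by rw [hB]; exact List.mem_cons_of_mem _ hv))
            rcases hu with hu | hu
            · exact hinv u (List.mem_append.mpr (Or.inl hu)) v hvA
            · rw [List.take_succ, getElem?_of_drop_cons hB] at hu
              simp at hu
              rcases hu with hu | rfl
              · exact hinv u (List.mem_append.mpr (Or.inr hu)) v hvA
              · rcases hv with hv | hv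
                · rw [hA] at hv
                  rcases List.mem_cons.mp hv with rfl | hv
                  · exact hxy
                  · exact lt_trans hxy ((List.pairwise_cons.mp pA').1 _ hv)
                · rw [drop_cons_succ hB] at hv
                  exact (List.pairwise_cons.mp pB').1 _ hv
          have hrec := ih i (j + 1) (by omega) hi (by omega) hinv'
            (cr ++ [-(VB[j]'(by omega))]) (jc ++ [y]) (cnz + 1)
          rw [hA, drop_cons_succ hB] at hrec
          have hsu : sUnion (x :: ca') (y :: cb') = y :: sUnion (x :: ca') cb' := by
            simp [sUnion, hxy, not_lt_of_gt hxy]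
          rw [hsu, List.foldl_cons, hstep]
          push_cast at hrec ⊢
          rw [hrec]
          have e1 : (x :: ca').zip (VA.drop i) = (x, VA[i]'(by omega)) :: ca'.zip (VA.drop (i + 1)) := by
            rw [hVAdrop, List.zip_cons_cons]
          have e2 : (y :: cb').zip (VB.drop j) = (y, VB[j]'(by omega)) :: cb'.zip (VB.drop (j + 1)) := by
            rw [hVBdrop, List.zip_cons_cons]
          have hmr : mergeRow ((x :: ca').zip (VA.drop i)) ((y :: cb').zip (VB.drop j))
              = (-(VB[j]'(by omega)) :: (mergeRow ((x :: ca').zip (VA.drop i)) (cb'.zip (VB.drop (j + 1)))).1,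
                 y :: (mergeRow ((x :: ca').zip (VA.drop i)) (cb'.zip (VB.drop (j + 1)))).2) := by
            rw [e1, e2]
            simp [mergeRow, hxy, not_lt_of_gt hxy]
          rw [hmr]
          simp [List.append_assoc]
          omega

theorem mem_sUnion' (z : Int) : ∀ (ca cb : List Int), z ∈ sUnion ca cb ↔ z ∈ ca ∨ z ∈ cb := by
  intro ca cb
  induction ca, cb using sUnion.induct with
  | case1 cb => simp [sUnion]
  | case2 ca h => cases ca <;> simp [sUnion]
  | case3 x ca y cb h ih => simp [sUnion, h, ih]; tauto
  | case4 x ca y cb h1 h2 ih => simp [sUnion, h1, h2, ih]; tauto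
  | case5 x ca y cb h1 h2 ih =>
    have : x = y := le_antisymm (not_lt.mp h2) (not_lt.mp h1)
    subst this
    simp [sUnion, ih]; tauto

theorem pairwise_sUnion : ∀ (ca cb : List Int), ca.Pairwise (· < ·) → cb.Pairwise (· < ·) →
    (sUnion ca cb).Pairwise (· < ·) := by
  intro ca cb
  induction ca, cb using sUnion.induct with
  | case1 cb => simp [sUnion]
  | case2 ca h => cases ca <;> simp [sUnion]
  | case3 x ca y cb h ih =>
    intro ha hb
    simp only [sUnion, if_pos h]
    rw [List.pairwise_cons]
    refine ⟨?_, ih (List.pairwise_cons.mp ha).2 hb⟩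
    intro z hz
    rcases (mem_sUnion' z ca (y :: cb)).mp hz with hz | hz
    · exact (List.pairwise_cons.mp ha).1 z hz
    · rcases List.mem_cons.mp hz with rfl | hz
      · exact h
      · exact lt_trans h ((List.pairwise_cons.mp hb).1 z hz)
  | case4 x ca y cb h1 h2 ih =>
    intro ha hb
    simp only [sUnion, if_neg h1, if_pos h2]
    rw [List.pairwise_cons]
    refine ⟨?_, ih ha (List.pairwise_cons.mp hb).2⟩
    intro z hz
    rcases (mem_sUnion' z (x :: ca) cb).mp hz with hz | hz
    · rcases List.mem_cons.mp hz with rfl | hz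
      · exact h2
      · exact lt_trans h2 ((List.pairwise_cons.mp ha).1 z hz)
    · exact (List.pairwise_cons.mp hb).1 z hz
  | case5 x ca y cb h1 h2 ih =>
    intro ha hb
    have hxy : x = y := le_antisymm (not_lt.mp h2) (not_lt.mp h1)
    subst hxy
    simp only [sUnion, if_neg h1]
    rw [List.pairwise_cons]
    refine ⟨?_, ih (List.pairwise_cons.mp ha).2 (List.pairwise_cons.mp hb).2⟩
    intro z hz
    rcases (mem_sUnion' z ca cb).mp hz with hz | hz
    · exact (List.pairwise_cons.mp ha).1 z hz
    · exact (List.pairwise_cons.mp hb).1 z hz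

theorem allC_eq (ca cb : List Int) :
    PySem.List.sorted (PySem.Set.union (PySem.Set.ofList ca) cb) (fun x => x) false
    = sUnion (PySem.List.sorted (PySem.Set.ofList ca) (fun x => x) false)
             (PySem.List.sorted (PySem.Set.ofList cb) (fun x => x) false) := by
  have pA := PySem.List.sorted_ofList_pairwise_lt (xs := ca)
  have pB := PySem.List.sorted_ofList_pairwise_lt (xs := cb)
  apply PySem.List.sorted_eq_of_perm_of_pairwise_lt
  · rw [List.perm_ext_iff_of_nodup
      ((pairwise_sUnion _ _ pA pB).imp ne_of_lt)
      (PySem.Set.nodup_union _ cb (PySem.Set.nodup_ofList ca))]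
    intro z
    simp [mem_sUnion', PySem.List.mem_sorted, PySem.Set.mem_union, PySem.Set.mem_ofList]
  · exact pairwise_sUnion _ _ pA pB

theorem rowA_eq (ca cb va vb : List Int)
    (hla : (PySem.List.sorted (PySem.Set.ofList ca) (fun x => x) false).length ≤ va.length)
    (hlb : (PySem.List.sorted (PySem.Set.ofList cb) (fun x => x) false).length ≤ vb.length)
    (cr jc : List Int) (cnz : Int) :
    (PySem.List.sorted (PySem.Set.union (PySem.Set.ofList ca) cb) (fun x => x) false).foldl
      (stepA va vb
        (PySem.List.sorted (PySem.Set.diff (PySem.Set.ofList ca) cb) (fun x => x) false)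
        (PySem.List.sorted (PySem.Set.diff (PySem.Set.ofList cb) ca) (fun x => x) false)
        (PySem.List.sorted (PySem.Set.inter (PySem.Set.ofList ca) cb) (fun x => x) false))
      (cr, jc, 0, 0, cnz)
    = (cr ++ (mergeRow ((PySem.List.sorted (PySem.Set.ofList ca) (fun x => x) false).zip va)
                       ((PySem.List.sorted (PySem.Set.ofList cb) (fun x => x) false).zip vb)).1,
       jc ++ (mergeRow ((PySem.List.sorted (PySem.Set.ofList ca) (fun x => x) false).zip va)
                       ((PySem.List.sorted (PySem.Set.ofList cb) (fun x => x) false).zip vb)).2,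
       ((PySem.List.sorted (PySem.Set.ofList ca) (fun x => x) false).length : Int),
       ((PySem.List.sorted (PySem.Set.ofList cb) (fun x => x) false).length : Int),
       cnz + ((mergeRow ((PySem.List.sorted (PySem.Set.ofList ca) (fun x => x) false).zip va)
                        ((PySem.List.sorted (PySem.Set.ofList cb) (fun x => x) false).zip vb)).1.length : Int)) := by
  rw [allC_eq ca cb]
  have h := innerA va vb
    (PySem.List.sorted (PySem.Set.diff (PySem.Set.ofList ca) cb) (fun x => x) false)
    (PySem.List.sorted (PySem.Set.diff (PySem.Set.ofList cb) ca) (fun x => x) false)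
    (PySem.List.sorted (PySem.Set.inter (PySem.Set.ofList ca) cb) (fun x => x) false)
    (PySem.List.sorted (PySem.Set.ofList ca) (fun x => x) false)
    (PySem.List.sorted (PySem.Set.ofList cb) (fun x => x) false)
    (PySem.List.sorted_ofList_pairwise_lt ca) (PySem.List.sorted_ofList_pairwise_lt cb) hla hlb
    (fun x => by
      simp [PySem.List.mem_sorted, PySem.Set.mem_diff, PySem.Set.mem_ofList])
    (fun x => by
      simp [PySem.List.mem_sorted, PySem.Set.mem_diff, PySem.Set.mem_ofList])
    (fun x => by
      simp [PySem.List.mem_sorted, PySem.Set.mem_inter, PySem.Set.mem_ofList])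
    0 0 (by omega) (by omega) (by simp) cr jc cnz
  simpa using h

theorem outer_eq (ar ia ja br ib jb : List Int)
    (hA : rowsOk ia.length ia ja ar) (hB : rowsOk ia.length ib jb br) :
    ∀ (t r : Nat), r + t = ia.length → 1 ≤ r →
    ∀ (cr ic jc : List Int),
    (PySem.List.pyRange (r : Int) (ia.length : Int) 1).foldl (rowStepA ar ia ja br ib jb)
      (cr, ic, jc, ia.getD (r - 1) 0 - ia.getD 0 0, ib.getD (r - 1) 0 - ib.getD 0 0, (cr.length : Int))
    = (let s := (PySem.List.pyRange (r : Int) (ia.length : Int) 1).foldl (rowStepB ar ia ja br ib jb)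
         (cr, ic, jc, ia.getD (r - 1) 0 - ia.getD 0 0, ib.getD (r - 1) 0 - ib.getD 0 0)
       (s.1, s.2.1, s.2.2.1, s.2.2.2.1, s.2.2.2.2, (s.1.length : Int))) := by
  intro t
  induction t with
  | zero =>
    intro r hr h1 cr ic jc
    have hnil : (PySem.List.pyRange (r : Int) (ia.length : Int) 1) = [] :=
      PySem.List.pyRange_one_eq_nil (by omega)
    rw [hnil]
    simp only [List.foldl_nil]
  | succ t ih =>
    intro r hr h1 cr ic jc
    have hrlt : (r : Int) < (ia.length : Int) := by omega
    rw [PySem.List.pyRange_one_cons hrlt]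
    rw [List.foldl_cons, List.foldl_cons]
    have hcast : ((r : Int) - 1) = ((r - 1 : Nat) : Int) := by omega
    have hget : ∀ l : List Int, PySem.List.pyGetD l (r : Int) 0 = l.getD r 0 := fun l => by
      rw [PySem.List.pyGetD_natCast]
    have hget' : ∀ l : List Int, PySem.List.pyGetD l ((r : Int) - 1) 0 = l.getD (r - 1) 0 := fun l => by
      rw [hcast, PySem.List.pyGetD_natCast]
    set lo := ia.getD (r - 1) 0 - ia.getD 0 0 with hlo
    set hi := ia.getD r 0 - ia.getD 0 0 with hhi
    set lob := ib.getD (r - 1) 0 - ib.getD 0 0 with hlob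
    set hib := ib.getD r 0 - ib.getD 0 0 with hhib
    have hr1 : r - 1 + 1 = r := by omega
    set M := mergeRow
      ((PySem.List.sorted (PySem.Set.ofList (PySem.List.slice ja (some lo) (some hi))) (fun x => x) false).zip
        (PySem.List.slice ar (some lo) (some hi)))
      ((PySem.List.sorted (PySem.Set.ofList (PySem.List.slice jb (some lob) (some hib))) (fun x => x) false).zip
        (PySem.List.slice br (some lob) (some hib))) with hM
    have hlena : (PySem.List.sorted (PySem.Set.ofList (PySem.List.slice ja (some lo) (some hi))) (fun x => x) false).length
        ≤ (PySem.List.slice ar (some lo) (some hi)).length := by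
      rw [PySem.List.length_sorted]
      have := hA (r - 1) (by omega)
      rwa [hr1] at this
    have hlenb : (PySem.List.sorted (PySem.Set.ofList (PySem.List.slice jb (some lob) (some hib))) (fun x => x) false).length
        ≤ (PySem.List.slice br (some lob) (some hib)).length := by
      rw [PySem.List.length_sorted]
      have := hB (r - 1) (by omega)
      rwa [hr1] at this
    have harith : lo + (ia.getD r 0 - ia.getD (r - 1) 0) = hi := by rw [hlo, hhi]; ring
    have harithb : lob + (ib.getD r 0 - ib.getD (r - 1) 0) = hib := by rw [hlob, hhib]; ring
    have hstepA : rowStepA ar ia ja br ib jb (cr, ic, jc, lo, lob, (cr.length : Int)) (r : Int)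
        = (cr ++ M.1, ic ++ [(cr.length : Int) + (M.1.length : Int)], jc ++ M.2, hi, hib,
           (cr.length : Int) + (M.1.length : Int)) := by
      simp only [rowStepA, hget, hget']
      rw [harith, harithb]
      rw [rowA_eq _ _ _ _ hlena hlenb]
    have hstepB : rowStepB ar ia ja br ib jb (cr, ic, jc, lo, lob) (r : Int)
        = (cr ++ M.1, ic ++ [((cr ++ M.1).length : Int)], jc ++ M.2, hi, hib) := by
      simp only [rowStepB, hget, hget']
      rw [show lo + ia.getD r 0 - ia.getD (r - 1) 0 = hi from by rw [hlo, hhi]; ring,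
          show lob + ib.getD r 0 - ib.getD (r - 1) 0 = hib from by rw [hlob, hhib]; ring]
      rw [mergeIdx_eq _ _ _ _ hlena hlenb 0 0]
      simp only [List.drop_zero]
      rw [← hM]
    have hlen' : ((cr ++ M.1).length : Int) = (cr.length : Int) + (M.1.length : Int) := by
      rw [List.length_append]; push_cast; ring
    rw [hstepA, hstepB, hlen']
    have hx := ih (r + 1) (by omega) (by omega)
      (cr ++ M.1) (ic ++ [(cr.length : Int) + (M.1.length : Int)]) (jc ++ M.2)
    have hsucc : ((r + 1 : Nat) : Int) = (r : Int) + 1 := by push_cast; ring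
    rw [hsucc] at hx
    have hr2 : r + 1 - 1 = r := by omega
    rw [hr2] at hx
    rw [hlen'] at hx
    exact hx

theorem final (ar ia ja br ib jb : List Int) (hPre : Pre_subtraction_algorithm_csr ar ia ja br ib jb) :
    subtraction_algorithm_csr ar ia ja br ib jb = subtraction_algorithm_csr_alt ar ia ja br ib jb := by
  obtain ⟨_, hA, hB⟩ := hPre
  unfold subtraction_algorithm_csr subtraction_algorithm_csr_alt
  rcases Nat.eq_zero_or_pos ia.length with h0 | hpos
  · rw [h0]
    rw [PySem.List.pyRange_one_eq_nil (by norm_num)]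
    rfl
  · have hx := outer_eq ar ia ja br ib jb hA hB (ia.length - 1) 1 (by omega) le_rfl [] [0] []
    simp only [Nat.cast_one, sub_self] at hx
    norm_num at hx ⊢
    rw [hx]
    exact ⟨rfl, rfl, rfl⟩

-- ===== VERDICT (by name: the statement is the Claim_ definition above) =====
theorem subtraction_algorithm_csr_spec : Claim_equal_subtraction_algorithm_csr := by
  intro ar ia ja br ib jb _ hPre
  unfold Spec_subtraction_algorithm_csr
  exact final ar ia ja br ib jb hPre
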